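-- pv_equiv track=rewrite | github.com/clmentcoutet/graphe | src/graph/number_of_path_with_cycle.py | find_cycles_edges
-- ===== SOURCE A (Python) =====
-- def find_cycles_edges(graph):
--     """
--     Find all backward edges in a directed graph.
--     A backward edge is one that points back to a node already visited in the current DFS path.
--
--     Args:
--         graph: A dictionary representing the directed graph {node: [neighbors]}
--
--     Returns:
--         A list of backward edges represented as 'source->target'
--     """
--     backward_edges = set()
--
--     def dfs(node, path_set, full_path):
--         # Add current node to the path
--         path_set.add(node)
--         full_path.append(node)
--
--         # Explore neighbors
--         for neighbor in graph.get(node, []):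
--             # If neighbor is already in our path, it's a backward edge
--             if neighbor in path_set:
--                 if node > neighbor:
--                     backward_edges.add((node, neighbor))
--             else:
--                 # Continue DFS with a new copy of the path set and full path
--                 dfs(neighbor, path_set.copy(), full_path.copy())
--
--     # Start DFS from each node to find all backward edges
--     for start_node in graph:
--         dfs(start_node, set(), [])
--
--     return sorted(backward_edges)
-- ===== SOURCE B (Python) =====
-- def find_cycles_edges(graph):
--     """Backward edges (u, v) with u > v whose source is reachable from its target.
--
--     Instead of enumerating every simple DFS path, compute for each key its
--     set of reachable nodes by iterating one-step expansion to a fixpoint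
--     (at most |nodes| rounds), then test each edge directly.
--     """
--     nodes = set(graph)
--     for vs in graph.values():
--         nodes.update(vs)
--     n = len(nodes)
--     reach = {}
--     for v in graph:
--         r = {v}
--         for _ in range(n):
--             r2 = r | {b for a in r for b in graph.get(a, [])}
--             if r2 == r:
--                 break
--             r = r2
--         reach[v] = r
--     out = set()
--     for u in graph:
--         for v in graph[u]:
--             if u > v and v in reach and u in reach[v]:
--                 out.add((u, v))
--     return sorted(out)
-- ===== Notes on version B (the rewrite author's own statement) =====
-- stated objective: alternative
-- what changed: A enumerates every simple DFS path from every node with copied path sets and collects back-edges along the way; B instead computes each key's reachable-node set once by iterating one-step frontier expansion to a fixpoint and then tests each edge u->v with u>v directly.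
import Mathlib
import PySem

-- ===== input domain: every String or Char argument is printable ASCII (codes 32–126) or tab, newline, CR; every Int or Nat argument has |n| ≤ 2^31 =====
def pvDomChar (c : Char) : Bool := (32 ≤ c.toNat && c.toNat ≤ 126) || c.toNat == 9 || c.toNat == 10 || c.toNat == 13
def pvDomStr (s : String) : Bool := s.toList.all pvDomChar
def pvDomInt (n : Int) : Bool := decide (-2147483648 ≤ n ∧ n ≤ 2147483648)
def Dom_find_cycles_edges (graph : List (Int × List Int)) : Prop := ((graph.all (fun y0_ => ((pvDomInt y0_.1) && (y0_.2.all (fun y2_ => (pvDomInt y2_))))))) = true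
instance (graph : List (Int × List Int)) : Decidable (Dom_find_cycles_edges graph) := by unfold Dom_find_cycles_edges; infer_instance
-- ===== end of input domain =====

-- B replaces A's enumeration of all simple DFS paths (with copied path sets) by a
-- per-key reachable-set fixpoint iteration, then tests each edge u->v (u > v) directly.

-- graph.get(x, []) — first-match association-list lookup (shared: both Pythons call graph.get)
def pvAdj (graph : List (Int × List Int)) (x : Int) : List Int :=
  (PySem.Dict.mk graph).getD x []

-- ===== PORT A =====
-- A's dfs; the 'full_path' list is appended to but never read, so it is not carried.
-- The fuel argument only makes the recursion structural: it is large enough to never run out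
-- (each recursive call adds one new node of the graph to path_set).
def pvDfsA (graph : List (Int × List Int)) :
    Nat → Int → PySem.Set Int → PySem.Set (Int × Int) → PySem.Set (Int × Int)
  | 0, _, _, acc => acc
  | fuel+1, node, ps, acc =>
    let ps' := PySem.Set.add ps node
    (pvAdj graph node).foldl
      (fun acc nb =>
        if nb ∈ ps' then
          (if nb < node then PySem.Set.add acc (node, nb) else acc)
        else pvDfsA graph fuel nb ps' acc) acc

def find_cycles_edges (graph : List (Int × List Int)) : List (Int × Int) :=
  let fuel := (graph.map (·.1) ++ (graph.map (·.2)).flatten).length + 1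
  let backward :=
    (graph.map (·.1)).foldl
      (fun acc s => pvDfsA graph fuel s PySem.Set.empty acc)
      (PySem.Set.empty : PySem.Set (Int × Int))
  PySem.List.sorted backward (fun p => toLex p)

-- ===== PORT B =====
-- r = r | {b for a in r for b in graph.get(a, [])}, iterated; stops early at a fixpoint.
def pvIterB (graph : List (Int × List Int)) : Nat → PySem.Set Int → PySem.Set Int
  | 0, r => r
  | k+1, r =>
    let r2 := PySem.Set.union r (r.flatMap (pvAdj graph))
    if PySem.Set.equal r2 r then r else pvIterB graph k r2

def find_cycles_edges_alt (graph : List (Int × List Int)) : List (Int × Int) :=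
  let nodes :=
    (graph.map (·.2)).foldl (fun s vs => PySem.Set.update s vs)
      (PySem.Set.ofList (graph.map (·.1)))
  let n := nodes.length
  let reach :=
    (graph.map (·.1)).foldl
      (fun d v => PySem.Dict.insert d v (pvIterB graph n (PySem.Set.add PySem.Set.empty v)))
      PySem.Dict.empty
  let out :=
    (graph.map (·.1)).foldl
      (fun out u =>
        (pvAdj graph u).foldl
          (fun out v =>
            if v < u ∧ (PySem.Dict.contains reach v) = true ∧ u ∈ PySem.Dict.getD reach v [] then
              PySem.Set.add out (u, v)
            else out) out)
      (PySem.Set.empty : PySem.Set (Int × Int))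
  PySem.List.sorted out (fun p => toLex p)

-- ===== PRECONDITION & SPEC =====
def Spec_find_cycles_edges (graph : List (Int × List Int)) (out : List (Int × Int)) : Prop := out = find_cycles_edges_alt graph
instance (graph : List (Int × List Int)) (out : List (Int × Int)) : Decidable (Spec_find_cycles_edges graph out) := by unfold Spec_find_cycles_edges; infer_instance

-- ===== CLAIM (what is proved, stated in full; the proofs are below) =====
def Claim_equal_find_cycles_edges : Prop := ∀ (graph : List (Int × List Int)), Dom_find_cycles_edges graph → Spec_find_cycles_edges graph (find_cycles_edges graph)

-- ===== LEMMAS AND PROOFS =====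

theorem pvAdj_spec (graph : List (Int × List Int)) (a : Int) :
    pvAdj graph a = [] ∨ ∃ p ∈ graph, p.1 = a ∧ pvAdj graph a = p.2 := by
  induction graph with
  | nil => left; rfl
  | cons hd tl ih =>
    unfold pvAdj at *
    rw [PySem.Dict.getD_eq_get?_getD] at *
    obtain ⟨k, vs⟩ := hd
    rw [PySem.Dict.get?_mk_cons]
    by_cases hk : k = a
    · subst hk
      right
      refine ⟨(k, vs), List.mem_cons_self, rfl, ?_⟩
      simp
    · have hb : (k == a) = false := by simp [hk]
      rw [hb]
      simp only [Bool.false_eq_true, if_false]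
      rcases ih with h | ⟨p, hp, h1, h2⟩
      · left; exact h
      · right; exact ⟨p, List.mem_cons_of_mem _ hp, h1, h2⟩


theorem pvAdj_mem_flatten {graph : List (Int × List Int)} {a y : Int}
    (h : y ∈ pvAdj graph a) : y ∈ (graph.map (·.2)).flatten := by
  rcases pvAdj_spec graph a with he | ⟨p, hp, _, h2⟩
  · rw [he] at h; cases h
  · rw [h2] at h
    exact List.mem_flatten.mpr ⟨p.2, List.mem_map.mpr ⟨p, hp, rfl⟩, h⟩

theorem pvAdj_key {graph : List (Int × List Int)} {a y : Int}
    (h : y ∈ pvAdj graph a) : a ∈ graph.map (·.1) := by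
  rcases pvAdj_spec graph a with he | ⟨p, hp, h1, _⟩
  · rw [he] at h; cases h
  · exact List.mem_map.mpr ⟨p, hp, h1⟩

def pvPath (graph : List (Int × List Int)) : Int → List Int → Int → Prop
  | v, [], u => v = u
  | v, b :: t, u => b ∈ pvAdj graph v ∧ pvPath graph b t u
def pvReach (graph : List (Int × List Int)) (v u : Int) : Prop := ∃ l, pvPath graph v l u

theorem pvPath_snoc {graph : List (Int × List Int)} {v u w : Int} {l : List Int}
    (h : pvPath graph v l u) (hw : w ∈ pvAdj graph u) : pvPath graph v (l ++ [w]) w := by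
  induction l generalizing v with
  | nil => cases h; exact ⟨hw, rfl⟩
  | cons b t ih => exact ⟨h.1, ih h.2⟩

theorem pvReach_tail {graph : List (Int × List Int)} {v u w : Int}
    (h : pvReach graph v u) (hw : w ∈ pvAdj graph u) : pvReach graph v w := by
  obtain ⟨l, hl⟩ := h
  exact ⟨l ++ [w], pvPath_snoc hl hw⟩

theorem pvPath_suffix {graph : List (Int × List Int)} :
    ∀ (p : List Int) {v b u : Int} {s : List Int}, pvPath graph v (p ++ b :: s) u → pvPath graph b s u := by
  intro p
  induction p with
  | nil => intro v b u s h; exact h.2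
  | cons c cs ih => intro v b u s h; exact ih h.2

theorem pvPath_mem {graph : List (Int × List Int)} :
    ∀ (l : List Int) {v u : Int}, pvPath graph v l u → ∀ y ∈ l, ∃ a, y ∈ pvAdj graph a := by
  intro l
  induction l with
  | nil => intro v u _ y hy; cases hy
  | cons b t ih =>
    intro v u h y hy
    rcases List.mem_cons.mp hy with rfl | hy
    · exact ⟨v, h.1⟩
    · exact ih h.2 y hy

theorem pvPath_simplify_aux {graph : List (Int × List Int)} :
    ∀ (n : Nat) (l : List Int), l.length ≤ n → ∀ (v u : Int), pvPath graph v l u →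
      ∃ l', pvPath graph v l' u ∧ (v :: l').Nodup ∧ l' ⊆ l := by
  intro n
  induction n with
  | zero =>
    intro l hl v u h
    have : l = [] := List.eq_nil_of_length_eq_zero (Nat.le_zero.mp hl)
    subst this
    exact ⟨[], h, by simp, by simp⟩
  | succ n ih =>
    intro l hl v u h
    by_cases hv : v ∈ l
    · obtain ⟨p, s, rfl⟩ := List.append_of_mem hv
      have hs : pvPath graph v s u := pvPath_suffix p h
      have hlen : s.length ≤ n := by
        have := hl; simp [List.length_append] at this; omega
      obtain ⟨l', h1, h2, h3⟩ := ih s hlen v u hs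
      refine ⟨l', h1, h2, h3.trans ?_⟩
      intro y hy
      exact List.mem_append_right _ (List.mem_cons_of_mem _ hy)
    · cases l with
      | nil => exact ⟨[], h, by simp, by simp⟩
      | cons b t =>
        have hlen : t.length ≤ n := by simp at hl; omega
        obtain ⟨l', h1, h2, h3⟩ := ih t hlen b u h.2
        refine ⟨b :: l', ⟨h.1, h1⟩, ?_, ?_⟩
        · refine List.nodup_cons.mpr ⟨?_, h2⟩
          intro hvmem
          rcases List.mem_cons.mp hvmem with rfl | hv'
          · exact hv List.mem_cons_self
          · exact hv (List.mem_cons_of_mem _ (h3 hv'))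
        · intro y hy
          rcases List.mem_cons.mp hy with rfl | hy
          · exact List.mem_cons_self
          · exact List.mem_cons_of_mem _ (h3 hy)

theorem pvPath_simplify {graph : List (Int × List Int)} :
    ∀ (l : List Int) (v u : Int), pvPath graph v l u →
      ∃ l', pvPath graph v l' u ∧ (v :: l').Nodup ∧ l' ⊆ l := fun l =>
  pvPath_simplify_aux l.length l (Nat.le_refl _)

theorem pv_foldl_pres {α β : Type} {P : β → Prop} :
    ∀ (l : List α) (f : β → α → β) (acc : β),
      (∀ a x, x ∈ l → P a → P (f a x)) → P acc → P (l.foldl f acc) := by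
  intro l f
  induction l with
  | nil => intro acc _ h0; exact h0
  | cons x t ih =>
    intro acc h h0
    exact ih _ (fun a y hy => h a y (List.mem_cons_of_mem _ hy)) (h acc x List.mem_cons_self h0)

theorem pv_foldl_reach {α β : Type} {P : β → Prop} :
    ∀ (l : List α) (f : β → α → β) (acc : β) (x0 : α),
      (∀ a x, x ∈ l → P a → P (f a x)) → x0 ∈ l → (∀ a, P (f a x0)) → P (l.foldl f acc) := by
  intro l f
  induction l with
  | nil => intro acc x0 _ hx0; cases hx0
  | cons x t ih =>
    intro acc x0 h hx0 hstep
    rcases List.mem_cons.mp hx0 with rfl | hx0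
    · exact pv_foldl_pres t f _ (fun a y hy => h a y (List.mem_cons_of_mem _ hy)) (hstep acc)
    · exact ih _ x0 (fun a y hy => h a y (List.mem_cons_of_mem _ hy)) hx0 hstep

theorem pvDfsA_mono {graph : List (Int × List Int)} :
    ∀ (fuel : Nat) (node : Int) (ps : PySem.Set Int) (acc : PySem.Set (Int × Int)) {y},
      y ∈ acc → y ∈ pvDfsA graph fuel node ps acc := by
  intro fuel
  induction fuel with
  | zero => intro node ps acc y hy; exact hy
  | succ f ih =>
    intro node ps acc y hy
    simp only [pvDfsA]
    refine pv_foldl_pres (P := fun a => y ∈ a) _ _ _ ?_ hy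
    intro a nb _ ha
    by_cases h1 : nb ∈ PySem.Set.add ps node
    · simp only [if_pos h1]
      by_cases h2 : nb < node
      · simp only [if_pos h2]
        exact (PySem.Set.mem_add _ _ _).mpr (Or.inl ha)
      · simpa [h2] using ha
    · simp only [if_neg h1]
      exact ih nb _ a ha

theorem pvDfsA_nodup {graph : List (Int × List Int)} :
    ∀ (fuel : Nat) (node : Int) (ps : PySem.Set Int) (acc : PySem.Set (Int × Int)),
      acc.Nodup → (pvDfsA graph fuel node ps acc).Nodup := by
  intro fuel
  induction fuel with
  | zero => intro _ _ acc h; exact h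
  | succ f ih =>
    intro node ps acc h
    simp only [pvDfsA]
    refine pv_foldl_pres (P := fun a => List.Nodup a) _ _ _ ?_ h
    intro a nb _ ha
    by_cases h1 : nb ∈ PySem.Set.add ps node
    · by_cases h2 : nb < node
      · simpa [h1, h2] using PySem.Set.nodup_add _ _ ha
      · simpa [h1, h2] using ha
    · simp only [if_neg h1]
      exact ih nb _ a ha

theorem pvDfsA_sound {graph : List (Int × List Int)} :
    ∀ (fuel : Nat) (node : Int) (ps : PySem.Set Int) (acc : PySem.Set (Int × Int)),
      (∀ x ∈ PySem.Set.add ps node, pvReach graph x node) →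
      ∀ p ∈ pvDfsA graph fuel node ps acc,
        p ∈ acc ∨ (p.2 ∈ pvAdj graph p.1 ∧ p.2 < p.1 ∧ pvReach graph p.2 p.1) := by
  intro fuel
  induction fuel with
  | zero => intro _ _ acc _ p hp; exact Or.inl hp
  | succ f ih =>
    intro node ps acc hreach
    simp only [pvDfsA]
    refine pv_foldl_pres
      (P := fun a => ∀ p ∈ a, p ∈ acc ∨ (p.2 ∈ pvAdj graph p.1 ∧ p.2 < p.1 ∧ pvReach graph p.2 p.1))
      _ _ _ ?_ (fun p hp => Or.inl hp)
    intro a nb hnb ha p hp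
    by_cases h1 : nb ∈ PySem.Set.add ps node
    · by_cases h2 : nb < node
      · rw [if_pos h1, if_pos h2] at hp
        rcases (PySem.Set.mem_add _ _ _).mp hp with hp | rfl
        · exact ha p hp
        · exact Or.inr ⟨hnb, h2, hreach nb h1⟩
      · rw [if_pos h1, if_neg h2] at hp
        exact ha p hp
    · rw [if_neg h1] at hp
      have hreach' : ∀ x ∈ PySem.Set.add (PySem.Set.add ps node) nb, pvReach graph x nb := by
        intro x hx
        rcases (PySem.Set.mem_add _ _ _).mp hx with hx | rfl
        · exact pvReach_tail (hreach x hx) hnb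
        · exact ⟨[], rfl⟩
      rcases ih nb _ a hreach' p hp with hp' | hgood
      · exact ha p hp'
      · exact Or.inr hgood

theorem pvDfsA_complete {graph : List (Int × List Int)} :
    ∀ (l : List Int) (x : Int) (fuel : Nat) (ps : PySem.Set Int) (acc : PySem.Set (Int × Int)) (u v : Int),
      pvPath graph x l u → (x :: l).Nodup → l.length + 1 ≤ fuel →
      (∀ y ∈ l, y ∉ PySem.Set.add ps x) → v ∈ PySem.Set.add ps x →
      v ∈ pvAdj graph u → v < u →
      (u, v) ∈ pvDfsA graph fuel x ps acc := by
  intro l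
  induction l with
  | nil =>
    intro x fuel ps acc u v hpath _ hfuel hps hv hadj hlt
    cases hpath
    obtain ⟨f, rfl⟩ : ∃ f, fuel = f + 1 := ⟨fuel - 1, by omega⟩
    simp only [pvDfsA]
    refine pv_foldl_reach (P := fun a => (x, v) ∈ a) _ _ _ v ?_ hadj ?_
    · intro a nb _ ha
      by_cases h1 : nb ∈ PySem.Set.add ps x
      · by_cases h2 : nb < x
        · rw [if_pos h1, if_pos h2]
          exact (PySem.Set.mem_add _ _ _).mpr (Or.inl ha)
        · rw [if_pos h1, if_neg h2]; exact ha
      · simp only [if_neg h1]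
        exact pvDfsA_mono f nb _ a ha
    · intro a
      rw [if_pos hv, if_pos hlt]
      exact (PySem.Set.mem_add _ _ _).mpr (Or.inr rfl)
  | cons b t ih =>
    intro x fuel ps acc u v hpath hnd hfuel hps hv hadj hlt
    obtain ⟨f, rfl⟩ : ∃ f, fuel = f + 1 := ⟨fuel - 1, by omega⟩
    simp only [pvDfsA]
    have hbps : b ∉ PySem.Set.add ps x := hps b List.mem_cons_self
    refine pv_foldl_reach (P := fun a => (u, v) ∈ a) _ _ _ b ?_ hpath.1 ?_
    · intro a nb _ ha
      by_cases h1 : nb ∈ PySem.Set.add ps x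
      · by_cases h2 : nb < x
        · rw [if_pos h1, if_pos h2]
          exact (PySem.Set.mem_add _ _ _).mpr (Or.inl ha)
        · rw [if_pos h1, if_neg h2]; exact ha
      · simp only [if_neg h1]
        exact pvDfsA_mono f nb _ a ha
    · intro a
      rw [if_neg hbps]
      refine ih b f (PySem.Set.add ps x) a u v hpath.2 (List.nodup_cons.mp hnd).2 (by simpa using hfuel) ?_ ?_ hadj hlt
      · intro y hy hmem
        rcases (PySem.Set.mem_add _ _ _).mp hmem with hmem | rfl
        · exact hps y (List.mem_cons_of_mem _ hy) hmem
        · exact (List.nodup_cons.mp (List.nodup_cons.mp hnd).2).1 hy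
      · exact (PySem.Set.mem_add _ _ _).mpr (Or.inl hv)

def pvUniv (graph : List (Int × List Int)) : List Int :=
  graph.map (·.1) ++ (graph.map (·.2)).flatten

def pvASet (graph : List (Int × List Int)) : PySem.Set (Int × Int) :=
  (graph.map (·.1)).foldl
    (fun acc s => pvDfsA graph ((pvUniv graph).length + 1) s PySem.Set.empty acc)
    (PySem.Set.empty : PySem.Set (Int × Int))

theorem pv_nodup_subset_length {l l' : List Int} (h : l.Nodup) (hs : l ⊆ l') :
    l.length ≤ l'.length := by
  calc l.length = l.toFinset.card := (List.toFinset_card_of_nodup h).symm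
    _ ≤ l'.toFinset.card := Finset.card_le_card (fun x hx => by
        simp only [List.mem_toFinset] at *; exact hs hx)
    _ ≤ l'.length := List.toFinset_card_le l'

theorem pvASet_mem {graph : List (Int × List Int)} {p : Int × Int} :
    p ∈ pvASet graph ↔ p.2 ∈ pvAdj graph p.1 ∧ p.2 < p.1 ∧ pvReach graph p.2 p.1 := by
  constructor
  · intro hp
    unfold pvASet at hp
    refine pv_foldl_pres
      (P := fun a => ∀ q ∈ a, q.2 ∈ pvAdj graph q.1 ∧ q.2 < q.1 ∧ pvReach graph q.2 q.1)
      (graph.map (·.1))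
      (fun acc s => pvDfsA graph ((pvUniv graph).length + 1) s PySem.Set.empty acc)
      (PySem.Set.empty : PySem.Set (Int × Int)) ?_ ?_ p hp
    · intro a s _ ha q hq
      have hstart : ∀ x ∈ PySem.Set.add PySem.Set.empty s, pvReach graph x s := by
        intro x hx
        rcases (PySem.Set.mem_add _ _ _).mp hx with hx | rfl
        · cases hx
        · exact ⟨[], rfl⟩
      rcases pvDfsA_sound _ s _ a hstart q hq with hq' | hgood
      · exact ha q hq'
      · exact hgood
    · intro q hq; cases hq
  · rintro ⟨hadj, hlt, l, hpath⟩
    obtain ⟨p1, p2⟩ := p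
    simp only at hadj hlt hpath ⊢
    obtain ⟨l', hpath', hnd', hsub'⟩ := pvPath_simplify l p2 p1 hpath
    -- p2 is a key: the simple path is nonempty since p2 < p1
    have hne : l' ≠ [] := by
      intro h; rw [h] at hpath'
      exact absurd hpath' (by intro h'; cases h'; exact lt_irrefl _ hlt)
    obtain ⟨b, t, rfl⟩ := List.exists_cons_of_ne_nil hne
    have hkey : p2 ∈ graph.map (·.1) := pvAdj_key hpath'.1
    unfold pvASet
    refine pv_foldl_reach (P := fun a => (p1, p2) ∈ a) _ _ _ p2 ?_ hkey ?_
    · intro a s _ ha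
      exact pvDfsA_mono _ s _ a ha
    · intro a
      refine pvDfsA_complete (b :: t) p2 _ PySem.Set.empty a p1 p2 hpath' hnd' ?_ ?_ ?_ hadj hlt
      · -- length bound via nodup subset of pvUniv
        have hsubU : (p2 :: b :: t) ⊆ pvUniv graph := by
          intro y hy
          rcases List.mem_cons.mp hy with rfl | hy
          · exact List.mem_append_left _ hkey
          · obtain ⟨a', ha'⟩ := pvPath_mem _ hpath' y hy
            exact List.mem_append_right _ (pvAdj_mem_flatten ha')
        have := pv_nodup_subset_length hnd' hsubU
        simp at this ⊢
        omega
      · intro y hy hmem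
        rcases (PySem.Set.mem_add _ _ _).mp hmem with hmem | rfl
        · cases hmem
        · exact (List.nodup_cons.mp hnd').1 hy
      · exact (PySem.Set.mem_add _ _ _).mpr (Or.inr rfl)

theorem pvASet_nodup (graph : List (Int × List Int)) : (pvASet graph).Nodup := by
  unfold pvASet
  refine pv_foldl_pres (P := fun a => List.Nodup a) _ _ _ ?_ List.nodup_nil
  intro a s _ ha
  exact pvDfsA_nodup _ s _ a ha

theorem pvIterB_supset {graph : List (Int × List Int)} :
    ∀ (k : Nat) (r : PySem.Set Int) {y}, y ∈ r → y ∈ pvIterB graph k r := by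
  intro k
  induction k with
  | zero => intro r y hy; exact hy
  | succ k ih =>
    intro r y hy
    simp only [pvIterB]
    split
    · exact hy
    · exact ih _ ((PySem.Set.mem_union _ _ _).mpr (Or.inl hy))

theorem pvIterB_sound {graph : List (Int × List Int)} :
    ∀ (k : Nat) (r : PySem.Set Int) (s : Int),
      (∀ y ∈ r, pvReach graph s y) → ∀ x ∈ pvIterB graph k r, pvReach graph s x := by
  intro k
  induction k with
  | zero => intro r s h x hx; exact h x hx
  | succ k ih =>
    intro r s h x hx
    simp only [pvIterB] at hx
    split at hx
    · exact h x hx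
    · refine ih _ s ?_ x hx
      intro y hy
      rcases (PySem.Set.mem_union _ _ _).mp hy with hy | hy
      · exact h y hy
      · obtain ⟨a, ha, hya⟩ := List.mem_flatMap.mp hy
        exact pvReach_tail (h a ha) hya

theorem pv_closed_mem {graph : List (Int × List Int)} {r : PySem.Set Int}
    (hc : ∀ a ∈ r, ∀ b ∈ pvAdj graph a, b ∈ r) :
    ∀ (l : List Int) (v u : Int), v ∈ r → pvPath graph v l u → u ∈ r := by
  intro l
  induction l with
  | nil => intro v u hv h; cases h; exact hv
  | cons b t ih => intro v u hv h; exact ih b u (hc v hv b h.1) h.2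

theorem pvIterB_complete {graph : List (Int × List Int)} :
    ∀ (k : Nat) (r : PySem.Set Int) (v u : Int) (l : List Int),
      pvPath graph v l u → l.length ≤ k → v ∈ r → u ∈ pvIterB graph k r := by
  intro k
  induction k with
  | zero =>
    intro r v u l h hl hv
    have : l = [] := List.eq_nil_of_length_eq_zero (Nat.le_zero.mp hl)
    subst this; cases h; exact hv
  | succ k ih =>
    intro r v u l h hl hv
    simp only [pvIterB]
    split
    · rename_i heq
      have hiff := (PySem.Set.equal_iff _ _).mp heq
      refine pv_closed_mem ?_ l v u hv h
      intro a ha b hb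
      exact (hiff b).mp ((PySem.Set.mem_union _ _ _).mpr
        (Or.inr (List.mem_flatMap.mpr ⟨a, ha, hb⟩)))
    · cases l with
      | nil =>
        cases h
        exact pvIterB_supset k _ ((PySem.Set.mem_union _ _ _).mpr (Or.inl hv))
      | cons b t =>
        refine ih _ b u t h.2 (by simpa using hl) ?_
        exact (PySem.Set.mem_union _ _ _).mpr (Or.inr (List.mem_flatMap.mpr ⟨v, hv, h.1⟩))

theorem pv_dictFold_get? (G : Int → List Int) :
    ∀ (l : List Int) (d : PySem.Dict Int (List Int)) (x : Int),
      (l.foldl (fun d v => PySem.Dict.insert d v (G v)) d).get? x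
        = if x ∈ l then some (G x) else d.get? x := by
  intro l
  induction l with
  | nil => intro d x; simp
  | cons v t ih =>
    intro d x
    simp only [List.foldl_cons, ih, PySem.Dict.get?_insert]
    by_cases hx : x ∈ t
    · simp [hx, List.mem_cons]
    · by_cases hv : x = v
      · simp [hv]
      · simp [hx, hv]

theorem pv_mem_foldl_update :
    ∀ (ls : List (List Int)) (s : PySem.Set Int) (x : Int),
      x ∈ ls.foldl (fun s vs => PySem.Set.update s vs) s ↔ x ∈ s ∨ ∃ vs ∈ ls, x ∈ vs := by
  intro ls
  induction ls with
  | nil => intro s x; simp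
  | cons vs t ih =>
    intro s x
    simp only [List.foldl_cons, ih, PySem.Set.mem_update, List.mem_cons]
    constructor
    · rintro (( h | h) | ⟨ws, hws, hx⟩)
      · exact Or.inl h
      · exact Or.inr ⟨vs, Or.inl rfl, h⟩
      · exact Or.inr ⟨ws, Or.inr hws, hx⟩
    · rintro (h | ⟨ws, (rfl | hws), hx⟩)
      · exact Or.inl (Or.inl h)
      · exact Or.inl (Or.inr hx)
      · exact Or.inr ⟨ws, hws, hx⟩

def pvNodes (graph : List (Int × List Int)) : PySem.Set Int :=
  (graph.map (·.2)).foldl (fun s vs => PySem.Set.update s vs)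
    (PySem.Set.ofList (graph.map (·.1)))

theorem pvNodes_mem {graph : List (Int × List Int)} {x : Int} :
    x ∈ pvNodes graph ↔ x ∈ graph.map (·.1) ∨ x ∈ (graph.map (·.2)).flatten := by
  unfold pvNodes
  rw [pv_mem_foldl_update]
  simp [PySem.Set.mem_ofList, List.mem_flatten]

theorem pv_mem_foldl_addIf {α : Type} (C : α → Prop) [DecidablePred C] (gf : α → Int × Int) :
    ∀ (l : List α) (s : PySem.Set (Int × Int)) (p : Int × Int),
      p ∈ l.foldl (fun s x => if C x then PySem.Set.add s (gf x) else s) s ↔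
        p ∈ s ∨ ∃ x ∈ l, C x ∧ p = gf x := by
  intro l
  induction l with
  | nil => intro s p; simp
  | cons x t ih =>
    intro s p
    simp only [List.foldl_cons, ih, List.mem_cons]
    by_cases hC : C x
    · rw [if_pos hC]
      constructor
      · rintro (h | ⟨y, hy, hCy, rfl⟩)
        · rcases (PySem.Set.mem_add _ _ _).mp h with h | rfl
          · exact Or.inl h
          · exact Or.inr ⟨x, Or.inl rfl, hC, rfl⟩
        · exact Or.inr ⟨y, Or.inr hy, hCy, rfl⟩
      · rintro (h | ⟨y, (rfl | hy), hCy, rfl⟩)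
        · exact Or.inl ((PySem.Set.mem_add _ _ _).mpr (Or.inl h))
        · exact Or.inl ((PySem.Set.mem_add _ _ _).mpr (Or.inr rfl))
        · exact Or.inr ⟨y, hy, hCy, rfl⟩
    · rw [if_neg hC]
      constructor
      · rintro (h | ⟨y, hy, hCy, rfl⟩)
        · exact Or.inl h
        · exact Or.inr ⟨y, Or.inr hy, hCy, rfl⟩
      · rintro (h | ⟨y, (rfl | hy), hCy, rfl⟩)
        · exact Or.inl h
        · exact absurd hCy hC
        · exact Or.inr ⟨y, hy, hCy, rfl⟩

theorem pv_mem_foldl_nested {C : Int → Int → Prop} [∀ u v, Decidable (C u v)] (adjf : Int → List Int) :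
    ∀ (ks : List Int) (s : PySem.Set (Int × Int)) (p : Int × Int),
      p ∈ ks.foldl
          (fun out u => (adjf u).foldl
            (fun out v => if C u v then PySem.Set.add out (u, v) else out) out) s ↔
        p ∈ s ∨ ∃ u ∈ ks, ∃ v ∈ adjf u, C u v ∧ p = (u, v) := by
  intro ks
  induction ks with
  | nil => intro s p; simp
  | cons u t ih =>
    intro s p
    simp only [List.foldl_cons, ih, List.mem_cons]
    rw [pv_mem_foldl_addIf (C u) (fun v => (u, v))]
    constructor
    · rintro ((h | ⟨v, hv, hC, rfl⟩) | ⟨w, hw, v, hv, hC, rfl⟩)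
      · exact Or.inl h
      · exact Or.inr ⟨u, Or.inl rfl, v, hv, hC, rfl⟩
      · exact Or.inr ⟨w, Or.inr hw, v, hv, hC, rfl⟩
    · rintro (h | ⟨w, (rfl | hw), v, hv, hC, rfl⟩)
      · exact Or.inl (Or.inl h)
      · exact Or.inl (Or.inr ⟨v, hv, hC, rfl⟩)
      · exact Or.inr ⟨w, hw, v, hv, hC, rfl⟩

def pvBSet (graph : List (Int × List Int)) : PySem.Set (Int × Int) :=
  let n := (pvNodes graph).length
  let reach :=
    (graph.map (·.1)).foldl
      (fun d v => PySem.Dict.insert d v (pvIterB graph n (PySem.Set.add PySem.Set.empty v)))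
      PySem.Dict.empty
  (graph.map (·.1)).foldl
    (fun out u =>
      (pvAdj graph u).foldl
        (fun out v =>
          if v < u ∧ (PySem.Dict.contains reach v) = true ∧ u ∈ PySem.Dict.getD reach v [] then
            PySem.Set.add out (u, v)
          else out) out)
    (PySem.Set.empty : PySem.Set (Int × Int))

theorem pvBSet_mem {graph : List (Int × List Int)} {p : Int × Int} :
    p ∈ pvBSet graph ↔
      ∃ u ∈ graph.map (·.1), ∃ v ∈ pvAdj graph u,
        v < u ∧ v ∈ graph.map (·.1) ∧ u ∈ pvIterB graph (pvNodes graph).length [v] ∧ p = (u, v) := by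
  unfold pvBSet
  rw [pv_mem_foldl_nested (adjf := pvAdj graph)]
  have hget : ∀ x, ((graph.map (·.1)).foldl
      (fun d v => PySem.Dict.insert d v (pvIterB graph (pvNodes graph).length (PySem.Set.add PySem.Set.empty v)))
      PySem.Dict.empty).get? x
      = if x ∈ graph.map (·.1) then some (pvIterB graph (pvNodes graph).length [x]) else none := by
    intro x
    rw [pv_dictFold_get? (fun v => pvIterB graph (pvNodes graph).length (PySem.Set.add PySem.Set.empty v))]
    simp
  constructor
  · rintro (h | ⟨u, hu, v, hv, ⟨hlt, hcon, hmem⟩, rfl⟩)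
    · cases h
    · rw [PySem.Dict.contains_eq_isSome_get?, hget v] at hcon
      by_cases hk : v ∈ graph.map (·.1)
      · rw [PySem.Dict.getD_eq_get?_getD, hget v, if_pos hk] at hmem
        exact ⟨u, hu, v, hv, hlt, hk, hmem, rfl⟩
      · rw [if_neg hk] at hcon; cases hcon
  · rintro ⟨u, hu, v, hv, hlt, hk, hmem, rfl⟩
    refine Or.inr ⟨u, hu, v, hv, ⟨hlt, ?_, ?_⟩, rfl⟩
    · rw [PySem.Dict.contains_eq_isSome_get?, hget v, if_pos hk]; rfl
    · rw [PySem.Dict.getD_eq_get?_getD, hget v, if_pos hk]; exact hmem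

theorem pvBSet_nodup (graph : List (Int × List Int)) : (pvBSet graph).Nodup := by
  unfold pvBSet
  refine pv_foldl_pres (P := fun a => List.Nodup a) _ _ _ ?_ List.nodup_nil
  intro a u _ ha
  refine pv_foldl_pres (P := fun a => List.Nodup a) _ _ _ ?_ ha
  intro a' v _ ha'
  split
  · exact PySem.Set.nodup_add _ _ ha'
  · exact ha'

theorem pvIter_iff_reach {graph : List (Int × List Int)} {v u : Int} (hvu : v < u) :
    (v ∈ graph.map (·.1) ∧ u ∈ pvIterB graph (pvNodes graph).length [v]) ↔ pvReach graph v u := by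
  constructor
  · rintro ⟨_, hmem⟩
    refine pvIterB_sound _ [v] v ?_ u hmem
    intro y hy
    rcases List.mem_singleton.mp hy with rfl
    exact ⟨[], rfl⟩
  · rintro ⟨l, hpath⟩
    obtain ⟨l', hpath', hnd', hsub'⟩ := pvPath_simplify l v u hpath
    have hne : l' ≠ [] := by
      intro h; rw [h] at hpath'
      exact absurd hpath' (by intro h'; cases h'; exact lt_irrefl _ hvu)
    obtain ⟨b, t, rfl⟩ := List.exists_cons_of_ne_nil hne
    have hkey : v ∈ graph.map (·.1) := pvAdj_key hpath'.1
    refine ⟨hkey, ?_⟩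
    refine pvIterB_complete _ [v] v u (b :: t) hpath' ?_ (List.mem_singleton.mpr rfl)
    have hsubN : (v :: b :: t) ⊆ pvNodes graph := by
      intro y hy
      rcases List.mem_cons.mp hy with rfl | hy
      · exact pvNodes_mem.mpr (Or.inl hkey)
      · obtain ⟨a', ha'⟩ := pvPath_mem _ hpath' y hy
        exact pvNodes_mem.mpr (Or.inr (pvAdj_mem_flatten ha'))
    have := pv_nodup_subset_length hnd' hsubN
    simp at this ⊢
    omega

theorem pv_sets_iff {graph : List (Int × List Int)} (p : Int × Int) :
    p ∈ pvASet graph ↔ p ∈ pvBSet graph := by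
  rw [pvASet_mem, pvBSet_mem]
  constructor
  · rintro ⟨hadj, hlt, hreach⟩
    obtain ⟨hk, hmem⟩ := (pvIter_iff_reach hlt).mpr hreach
    exact ⟨p.1, pvAdj_key hadj, p.2, hadj, hlt, hk, hmem, rfl⟩
  · rintro ⟨u, hu, v, hv, hlt, hk, hmem, rfl⟩
    exact ⟨hv, hlt, (pvIter_iff_reach hlt).mp ⟨hk, hmem⟩⟩

theorem pv_sorted_eq {s t : List (Int × Int)} (hperm : s.Perm t) (hs : s.Nodup) :
    PySem.List.sorted s (fun p => toLex p) = PySem.List.sorted t (fun p => toLex p) := by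
  refine (PySem.List.sorted_eq_of_perm_of_pairwise_lt t (PySem.List.sorted s (fun p => toLex p)) (fun p => toLex p) ?_ ?_).symm
  · exact (PySem.List.sorted_perm s (fun p => toLex p) false).trans hperm
  · have hnd : (PySem.List.sorted s (fun p => toLex p)).Nodup :=
      ((PySem.List.sorted_perm s (fun p => toLex p) false).nodup_iff).mpr hs
    have hle := PySem.List.sorted_pairwise s (fun p => toLex p)
    refine (hle.and hnd).imp ?_
    rintro a b ⟨h1, h2⟩
    exact lt_of_le_of_ne h1 (fun hc => h2 (toLex.injective hc))

-- ===== VERDICT (by name: the statement is the Claim_ definition above) =====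
theorem find_cycles_edges_spec : Claim_equal_find_cycles_edges := by
  intro graph _
  unfold Spec_find_cycles_edges
  show find_cycles_edges graph = find_cycles_edges_alt graph
  have hA : find_cycles_edges graph = PySem.List.sorted (pvASet graph) (fun p => toLex p) := rfl
  have hB : find_cycles_edges_alt graph = PySem.List.sorted (pvBSet graph) (fun p => toLex p) := rfl
  rw [hA, hB]
  exact pv_sorted_eq
    ((List.perm_ext_iff_of_nodup (pvASet_nodup graph) (pvBSet_nodup graph)).mpr
      (fun p => pv_sets_iff p))
    (pvASet_nodup graph)
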